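-- pv_equiv track=rewrite | github.com/Arsen1302/Code-copy-detector | TestData/solutions/problem_1130_3.py | solution_1130_3
-- ===== SOURCE A (Python) =====
-- from typing import List
--
-- def solution_1130_3(nums: List[int], k: int) -> List[int]:
--     i=0
--     n=len(nums)
--     res_len=0
--     stack=[]
--     while(i<n):
--         while(stack and (n-i)>k-res_len and stack[-1]>nums[i]):
--             stack.pop()
--             res_len-=1
--         else:
--             if(res_len<k):
--                 stack.append(nums[i])
--                 res_len+=1
--         i+=1
--
--     return stack
-- ===== SOURCE B (Python) =====
-- from typing import List
--
-- def solution_1130_3(nums: List[int], k: int) -> List[int]: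
--     n = len(nums)
--     if k >= n:
--         return list(nums)
--     result = []
--     rest = nums
--     for j in range(k):
--         window = len(rest) - (k - 1 - j)
--         best = 0
--         for i in range(1, window):
--             if rest[i] < rest[best]:
--                 best = i
--         result.append(rest[best])
--         rest = rest[best + 1:]
--     return result
-- ===== Notes on version B (the rewrite author's own statement) =====
-- stated objective: alternative
-- what changed: Replaced the monotonic push/pop stack (single left-to-right pass with capacity-limited pops) by a k-pass greedy selection: each output element is the leftmost minimum of the current feasible window, after which the list is cut past that minimum.
import Mathlib
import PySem

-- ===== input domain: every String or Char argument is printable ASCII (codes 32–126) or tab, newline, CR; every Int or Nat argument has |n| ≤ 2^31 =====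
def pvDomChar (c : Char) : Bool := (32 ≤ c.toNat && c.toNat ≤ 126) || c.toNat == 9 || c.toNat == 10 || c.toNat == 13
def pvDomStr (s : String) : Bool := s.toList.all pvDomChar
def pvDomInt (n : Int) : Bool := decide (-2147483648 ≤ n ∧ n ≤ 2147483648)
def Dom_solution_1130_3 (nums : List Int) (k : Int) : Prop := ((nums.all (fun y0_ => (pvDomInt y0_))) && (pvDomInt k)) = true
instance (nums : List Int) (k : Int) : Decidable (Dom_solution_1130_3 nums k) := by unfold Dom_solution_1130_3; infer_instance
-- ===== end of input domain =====

-- B replaces A's capacity-limited monotonic stack by a k-pass greedy selection (leftmost window minimum,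
-- then cut the list past it): a different algorithm of similar size (alternative, not claimed faster).

-- ===== PORT A =====
-- inner 'while stack and (n-i)>k-res_len and stack[-1]>nums[i]: stack.pop(); res_len-=1'
-- (nmi = n - i; stack[-1] via pyGetD, always in range since the stack is nonempty in the guard)
def pvPopA (x nmi k : Int) (st : List Int) (r : Int) : List Int × Int :=
  if h : st ≠ [] ∧ nmi > k - r ∧ PySem.List.pyGetD st (-1) 0 > x then
    pvPopA x nmi k st.dropLast (r - 1)
  else (st, r)
termination_by st.length
decreasing_by
  simp only [List.length_dropLast]
  have := List.length_pos_of_ne_nil h.1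
  omega

-- outer 'while i<n' loop; the while/else's else-branch (the conditional push) runs every iteration
def pvLoopA (nums : List Int) (n k i : Int) (st : List Int) (r : Int) : List Int :=
  if hi : i < n then
    let x := PySem.List.pyGetD nums i 0      -- nums[i], in range since 0 ≤ i < n
    let p := pvPopA x (n - i) k st r
    let q := if p.2 < k then (p.1 ++ [x], p.2 + 1) else p
    pvLoopA nums n k (i + 1) q.1 q.2
  else st
termination_by (n - i).toNat
decreasing_by omega

def solution_1130_3 (nums : List Int) (k : Int) : List Int :=
  pvLoopA nums nums.length k 0 [] 0

-- ===== PORT B =====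
-- 'for i in range(1, window): if rest[i] < rest[best]: best = i'
def pvScanB (rest : List Int) (window i best : Int) : Int :=
  if hi : i < window then
    pvScanB rest window (i + 1)
      (if PySem.List.pyGetD rest i 0 < PySem.List.pyGetD rest best 0 then i else best)
  else best
termination_by (window - i).toNat
decreasing_by omega

-- 'for j in range(k): window = len(rest)-(k-1-j); … result.append(rest[best]); rest = rest[best+1:]'
def pvGoB (k j : Int) (res rest : List Int) : List Int :=
  if hj : j < k then
    let window : Int := (rest.length : Int) - (k - 1 - j)
    let best := pvScanB rest window 1 0
    let m := PySem.List.pyGetD rest best 0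
    pvGoB k (j + 1) (res ++ [m]) (PySem.List.slice rest (some (best + 1)) none)
  else res
termination_by (k - j).toNat
decreasing_by omega

def solution_1130_3_alt (nums : List Int) (k : Int) : List Int :=
  if k ≥ (nums.length : Int) then nums
  else pvGoB k 0 [] nums

-- ===== PRECONDITION & SPEC =====
def Spec_solution_1130_3 (nums : List Int) (k : Int) (out : List Int) : Prop := out = solution_1130_3_alt nums k
instance (nums : List Int) (k : Int) (out : List Int) : Decidable (Spec_solution_1130_3 nums k out) := by unfold Spec_solution_1130_3; infer_instance

-- ===== CLAIM (what is proved, stated in full; the proofs are below) =====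
def Claim_equal_solution_1130_3 : Prop := ∀ (nums : List Int) (k : Int), Dom_solution_1130_3 nums k → Spec_solution_1130_3 nums k (solution_1130_3 nums k)

-- ===== LEMMAS AND PROOFS =====

-- list-based reformulation of A's loop: the remaining-input length replaces n - i,
-- and the stack length replaces res_len (they coincide throughout A's run)
def pop2 (k rem x : Int) (st : List Int) : List Int :=
  if h : st ≠ [] ∧ rem > k - (st.length : Int) ∧ PySem.List.pyGetD st (-1) 0 > x then
    pop2 k rem x st.dropLast
  else st
termination_by st.length
decreasing_by
  simp only [List.length_dropLast]
  have := List.length_pos_of_ne_nil h.1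
  omega

def go2 (k : Int) : List Int → List Int → List Int
  | [], st => st
  | x :: rest, st =>
    let st' := pop2 k ((rest.length : Int) + 1) x st
    go2 k rest (if (st'.length : Int) < k then st' ++ [x] else st')

-- recursive form of B's greedy loop (r = number of picks still to make)
def greedyRec (rest : List Int) (r : Int) : List Int :=
  if hr : 0 < r then
    let window : Int := (rest.length : Int) - (r - 1)
    let best := pvScanB rest window 1 0
    PySem.List.pyGetD rest best 0 :: greedyRec (rest.drop (best + 1).toNat) (r - 1)
  else []
termination_by r.toNat
decreasing_by omega

-- ---- bridges: ports to list-based forms ----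

theorem popA_eq (x nmi k : Int) : ∀ st : List Int,
    pvPopA x nmi k st (st.length : Int) = (pop2 k nmi x st, ((pop2 k nmi x st).length : Int)) := by
  intro st
  fun_induction pop2 k nmi x st with
  | case1 st h ih =>
    rw [pvPopA, dif_pos h]
    have hl : (st.length : Int) - 1 = (st.dropLast.length : Int) := by
      have := List.length_pos_of_ne_nil h.1
      simp only [List.length_dropLast]; omega
    rw [hl, ih]
  | case2 st h =>
    rw [pvPopA, dif_neg h]



theorem loopA_eq (nums : List Int) (k : Int) : ∀ (fuel j : Nat) (st : List Int),
    nums.length - j ≤ fuel →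
    pvLoopA nums (nums.length : Int) k (j : Int) st (st.length : Int) = go2 k (nums.drop j) st := by
  intro fuel
  induction fuel with
  | zero =>
    intro j st hle
    have hj : nums.length ≤ j := by omega
    rw [pvLoopA, dif_neg (by exact_mod_cast not_lt.mpr hj)]
    rw [List.drop_eq_nil_of_le hj]
    rfl
  | succ f ih =>
    intro j st hle
    by_cases hj : j < nums.length
    · rw [pvLoopA, dif_pos (by exact_mod_cast hj)]
      simp only []
      have hx : PySem.List.pyGetD nums (j : Int) 0 = nums[j] := by
        rw [PySem.List.pyGetD_natCast, List.getD_eq_getElem _ _ hj]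
      rw [hx, popA_eq]
      rw [List.drop_eq_getElem_cons hj]
      simp only [go2]
      have hrem : (nums.length : Int) - (j : Int) = ((nums.drop (j + 1)).length : Int) + 1 := by
        simp only [List.length_drop]; omega
      rw [hrem]
      set st2 := pop2 k (((nums.drop (j + 1)).length : Int) + 1) nums[j] st with hst2
      by_cases hlt : (st2.length : Int) < k
      · rw [if_pos hlt, if_pos hlt]
        have : (st2.length : Int) + 1 = (((st2 ++ [nums[j]]).length : Nat) : Int) := by
          simp
        rw [this]
        have := ih (j + 1) (st2 ++ [nums[j]]) (by omega)
        rw [show ((j : Int) + 1) = ((j + 1 : Nat) : Int) by push_cast; ring]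
        exact this
      · rw [if_neg hlt, if_neg hlt]
        have := ih (j + 1) st2 (by omega)
        rw [show ((j : Int) + 1) = ((j + 1 : Nat) : Int) by push_cast; ring]
        exact this
    · rw [pvLoopA, dif_neg (by exact_mod_cast not_lt.mpr (not_lt.mp hj))]
      rw [List.drop_eq_nil_of_le (not_lt.mp hj)]
      rfl

theorem scan_nonneg (rest : List Int) (w : Int) : ∀ (i b : Int), 0 ≤ i → 0 ≤ b → 0 ≤ pvScanB rest w i b := by
  intro i b
  fun_induction pvScanB rest w i b with
  | case1 i b hi ih =>
    intro h0i h0b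
    exact ih (by omega) (by split <;> omega)
  | case2 i b hi => intro _ h; exact h


theorem goB_eq (k : Int) : ∀ (c : Nat) (j : Int), 0 ≤ j → ∀ (res rest : List Int),
    (k - j).toNat = c → pvGoB k j res rest = res ++ greedyRec rest (k - j) := by
  intro c
  induction c with
  | zero =>
    intro j hj res rest hc
    rw [pvGoB, dif_neg (by omega), greedyRec, dif_neg (by omega)]
    simp
  | succ f ih =>
    intro j hj res rest hc
    have hjk : j < k := by omega
    rw [pvGoB]
    simp only [dif_pos hjk]
    have hw : (rest.length : Int) - (k - 1 - j) = (rest.length : Int) - (k - j - 1) := by ring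
    rw [hw]
    have hb0 : 0 ≤ pvScanB rest ((rest.length : Int) - (k - j - 1)) 1 0 + 1 := by
      have := scan_nonneg rest ((rest.length : Int) - (k - j - 1)) 1 0 (by omega) le_rfl
      omega
    rw [PySem.List.slice_from _ hb0]
    rw [ih (j + 1) (by omega) _ _ (by omega)]
    rw [show k - (j + 1) = k - j - 1 by ring]
    have hpos : (0:Int) < k - j := by omega
    conv_rhs => rw [greedyRec, dif_pos hpos]
    simp [List.append_assoc]

theorem alt_eq (nums : List Int) (k : Int) :
    solution_1130_3_alt nums k = if k ≥ (nums.length : Int) then nums else greedyRec nums k := by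
  unfold solution_1130_3_alt
  by_cases hk : k ≥ (nums.length : Int)
  · rw [if_pos hk, if_pos hk]
  · rw [if_neg hk, if_neg hk]
    by_cases h0 : 0 ≤ k
    · rw [goB_eq k k.toNat 0 le_rfl [] nums (by omega)]
      simp
    · rw [goB_eq k 0 0 le_rfl [] nums (by omega)]
      simp

-- ---- the scan finds the leftmost minimum of the window ----

theorem scan_spec (xs : List Int) (w : Int) : ∀ (i b : Int),
    0 ≤ b → b < i → i ≤ w →
    (∀ t : Int, 0 ≤ t → t < b → PySem.List.pyGetD xs b 0 < PySem.List.pyGetD xs t 0) →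
    (∀ t : Int, 0 ≤ t → t < i → PySem.List.pyGetD xs b 0 ≤ PySem.List.pyGetD xs t 0) →
    0 ≤ pvScanB xs w i b ∧ pvScanB xs w i b < w ∧
    (∀ t : Int, 0 ≤ t → t < pvScanB xs w i b →
      PySem.List.pyGetD xs (pvScanB xs w i b) 0 < PySem.List.pyGetD xs t 0) ∧
    (∀ t : Int, 0 ≤ t → t < w → PySem.List.pyGetD xs (pvScanB xs w i b) 0 ≤ PySem.List.pyGetD xs t 0) := by
  intro i b
  fun_induction pvScanB xs w i b with
  | case1 i b hi ih =>
    intro h0b hbi hiw hstrict hle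
    by_cases hc : PySem.List.pyGetD xs i 0 < PySem.List.pyGetD xs b 0
    · simp only [dif_pos hc] at ih; simp only [if_pos hc]
      refine ih (by omega) (by omega) (by omega) ?_ ?_
      · intro t h0t hti
        exact lt_of_lt_of_le hc (hle t h0t hti)
      · intro t h0t hti
        by_cases ht : t < i
        · exact le_of_lt (lt_of_lt_of_le hc (hle t h0t ht))
        · have : t = i := by omega
          simp [this]
    · simp only [dif_neg hc] at ih; simp only [if_neg hc]
      refine ih h0b (by omega) (by omega) hstrict ?_
      intro t h0t hti
      by_cases ht : t < i
      · exact hle t h0t ht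
      · have : t = i := by omega
        rw [this]; omega
  | case2 i b hi =>
    intro h0b hbi hiw hstrict hle
    have : i = w := by omega
    exact ⟨h0b, by omega, hstrict, fun t h0t htw => hle t h0t (by omega)⟩

-- ---- behaviour of the stack pass ----

theorem pop2_mem (k rem x : Int) : ∀ (st : List Int) (y : Int), y ∈ pop2 k rem x st → y ∈ st := by
  intro st
  fun_induction pop2 k rem x st with
  | case1 st h ih =>
    intro y hy
    exact List.dropLast_subset _ (ih y hy)
  | case2 st h => intro y hy; exact hy

theorem pop2_length_le (k rem x : Int) : ∀ st : List Int, (pop2 k rem x st).length ≤ st.length := by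
  intro st
  fun_induction pop2 k rem x st with
  | case1 st h ih => simp only [List.length_dropLast] at ih; omega
  | case2 st h => omega

-- when no pop can fire (enough room), the stack is untouched
theorem pop2_of_le (k rem x : Int) (st : List Int) (h : rem ≤ k - (st.length : Int)) :
    pop2 k rem x st = st := by
  rw [pop2]
  rw [dif_neg]
  intro hc; omega

-- when every stack element is larger and capacity allows, everything is popped
theorem pop2_all (k rem x : Int) : ∀ st : List Int, (∀ y ∈ st, x < y) → k - 1 < rem →
    pop2 k rem x st = [] := by
  intro st
  fun_induction pop2 k rem x st with
  | case1 st h ih =>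
    intro hall hrem
    exact ih (fun y hy => hall y (List.dropLast_subset _ hy)) hrem
  | case2 st h =>
    intro hall hrem
    by_contra hne
    apply h
    refine ⟨hne, ?_, ?_⟩
    · have := List.length_pos_of_ne_nil hne; omega
    · rw [PySem.List.pyGetD_neg_one _ _ hne]
      exact hall _ (List.getLast_mem hne)

-- a strictly smaller minimum never pops below itself
theorem pop2_nil (k rem x : Int) : pop2 k rem x [] = [] := by
  rw [pop2]; simp

theorem pop2_cons_min (k rem x m : Int) (hmx : rem > k - 1 → m ≤ x) : ∀ st' : List Int,
    pop2 k rem x (m :: st') = m :: pop2 (k - 1) rem x st' := by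
  intro st'
  induction st' using List.reverseRecOn with
  | nil =>
    have e1 : pop2 k rem x [m] = [m] := by
      rw [pop2]
      rw [dif_neg]
      rintro ⟨-, h2, h3⟩
      simp only [List.length_cons, List.length_nil] at h2
      have hx : PySem.List.pyGetD [m] (-1) 0 = m := by
        rw [PySem.List.pyGetD_neg_one _ _ (by simp)]; simp
      rw [hx] at h3
      have := hmx (by omega)
      omega
    rw [e1, pop2_nil]
  | append_singleton ys y ih =>
    have hlast : PySem.List.pyGetD (m :: (ys ++ [y])) (-1) 0 = y := by
      rw [show m :: (ys ++ [y]) = (m :: ys) ++ [y] by simp,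
        PySem.List.pyGetD_neg_one _ _ (by simp)]
      simp
    have hlast' : PySem.List.pyGetD (ys ++ [y]) (-1) 0 = y := by
      rw [PySem.List.pyGetD_neg_one _ _ (by simp)]; simp
    by_cases hc : rem > k - ((ys.length : Int) + 2) ∧ y > x
    · have e1 : pop2 k rem x (m :: (ys ++ [y])) = pop2 k rem x (m :: ys) := by
        rw [pop2]
        rw [dif_pos (by
          refine ⟨by simp, ?_, ?_⟩
          · simp
            omega
          · rw [hlast]; exact hc.2)]
        rw [show (m :: (ys ++ [y])).dropLast = m :: ys by
          rw [show m :: (ys ++ [y]) = (m :: ys) ++ [y] by simp, List.dropLast_concat]]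
      have e2 : pop2 (k - 1) rem x (ys ++ [y]) = pop2 (k - 1) rem x ys := by
        rw [pop2]
        rw [dif_pos (by
          refine ⟨by simp, ?_, ?_⟩
          · simp
            omega
          · rw [hlast']; exact hc.2)]
        rw [List.dropLast_concat]
      rw [e1, e2, ih]
    · have e1 : pop2 k rem x (m :: (ys ++ [y])) = m :: (ys ++ [y]) := by
        rw [pop2]
        rw [dif_neg]
        rintro ⟨-, h2, h3⟩
        rw [hlast] at h3
        simp at h2
        exact hc ⟨by omega, h3⟩
      have e2 : pop2 (k - 1) rem x (ys ++ [y]) = ys ++ [y] := by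
        rw [pop2]
        rw [dif_neg]
        rintro ⟨-, h2, h3⟩
        rw [hlast'] at h3
        simp at h2
        exact hc ⟨by omega, h3⟩
      rw [e1, e2]


-- running through a prefix whose elements all exceed m keeps the stack above m
theorem run_prefix (k m : Int) (suffix : List Int) : ∀ (p st : List Int),
    (∀ y ∈ p, m < y) → (∀ y ∈ st, m < y) → (st.length : Int) ≤ k →
    ∃ st₂, go2 k (p ++ m :: suffix) st = go2 k (m :: suffix) st₂ ∧
      (∀ y ∈ st₂, m < y) ∧ ((st₂.length : Int) ≤ k) := by
  intro p
  induction p with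
  | nil =>
    intro st hp hst hlen
    exact ⟨st, rfl, hst, hlen⟩
  | cons x p' ih =>
    intro st hp hst hlen
    rw [List.cons_append]
    simp only [go2]
    set st' := pop2 k (((p' ++ m :: suffix).length : Int) + 1) x st with hst'
    have hmem' : ∀ y ∈ st', m < y := fun y hy => hst y (pop2_mem _ _ _ _ _ hy)
    have hlen' : st'.length ≤ st.length := pop2_length_le _ _ _ _
    by_cases hpush : (st'.length : Int) < k
    · rw [if_pos hpush]
      refine ih (st' ++ [x]) (fun y hy => hp y (List.mem_cons_of_mem _ hy)) ?_ ?_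
      · intro y hy
        rcases List.mem_append.mp hy with h | h
        · exact hmem' y h
        · simp at h
          subst h
          exact hp _ List.mem_cons_self
      · simp only [List.length_append, List.length_cons, List.length_nil]
        push_cast
        omega
    · rw [if_neg hpush]
      exact ih st' (fun y hy => hp y (List.mem_cons_of_mem _ hy)) hmem' (by omega)

-- once the window minimum m sits at the bottom, the rest of the run is the (k-1)-run on its right
theorem bisim (k m : Int) : ∀ (suffix : List Int) (st' : List Int),
    (∀ (a : List Int) (x : Int) (b : List Int), suffix = a ++ x :: b →
      (b.length : Int) + 1 > k - 1 → m ≤ x) →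
    go2 k suffix (m :: st') = m :: go2 (k - 1) suffix st' := by
  intro suffix
  induction suffix with
  | nil => intro st' _; rfl
  | cons x rest ih =>
    intro st' H3
    have hx : ((rest.length : Int) + 1) > k - 1 → m ≤ x := fun h => H3 [] x rest rfl h
    simp only [go2]
    rw [pop2_cons_min k ((rest.length : Int) + 1) x m hx st']
    set st'2 := pop2 (k - 1) ((rest.length : Int) + 1) x st' with hst2
    have H3' : ∀ (a : List Int) (y : Int) (b : List Int), rest = a ++ y :: b →
        (b.length : Int) + 1 > k - 1 → m ≤ y := by
      intro a y b hb hlen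
      exact H3 (x :: a) y b (by rw [hb, List.cons_append]) hlen
    by_cases hpush : (st'2.length : Int) < k - 1
    · rw [if_pos (by simp only [List.length_cons]; push_cast; omega), if_pos hpush]
      rw [show (m :: st'2) ++ [x] = m :: (st'2 ++ [x]) by simp]
      exact ih (st'2 ++ [x]) H3'
    · rw [if_neg (by simp only [List.length_cons]; push_cast; omega), if_neg hpush]
      exact ih st'2 H3'

-- degenerate stacks
theorem go2_nonpos (k : Int) (hk : k ≤ 0) : ∀ xs : List Int, go2 k xs [] = [] := by
  intro xs
  induction xs with
  | nil => rfl
  | cons x rest ih =>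
    simp only [go2, pop2_nil]
    rw [if_neg (by simp; omega)]
    exact ih

theorem go2_full (k : Int) : ∀ (xs st : List Int), (st.length : Int) + (xs.length : Int) ≤ k →
    go2 k xs st = st ++ xs := by
  intro xs
  induction xs with
  | nil => intro st _; simp [go2]
  | cons x rest ih =>
    intro st h
    simp only [List.length_cons] at h
    simp only [go2]
    rw [pop2_of_le k ((rest.length : Int) + 1) x st (by push_cast at h ⊢; omega)]
    rw [if_pos (by push_cast at h ⊢; omega)]
    rw [ih (st ++ [x]) (by simp; push_cast at h ⊢; omega)]
    simp

-- one greedy step of the stack run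
theorem step_lemma (xs : List Int) (k : Int) (h0 : 0 < k) (hk : k ≤ (xs.length : Int)) :
    go2 k xs [] =
      PySem.List.pyGetD xs (pvScanB xs ((xs.length : Int) - (k - 1)) 1 0) 0 ::
      go2 (k - 1) (xs.drop ((pvScanB xs ((xs.length : Int) - (k - 1)) 1 0).toNat + 1)) [] := by
  set w : Int := (xs.length : Int) - (k - 1) with hw
  set b : Int := pvScanB xs w 1 0 with hb
  have hw1 : (1 : Int) ≤ w := by omega
  obtain ⟨hb0, hbw, hstrict, hmin⟩ :=
    scan_spec xs w 1 0 le_rfl (by omega) hw1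
      (by intro t h1 h2; omega)
      (by intro t h1 h2; have ht : t = 0 := by omega
          rw [ht])
  set bn : Nat := b.toNat with hbn
  have hbnb : (bn : Int) = b := Int.toNat_of_nonneg hb0
  have hbnlen : bn < xs.length := by omega
  set m : Int := PySem.List.pyGetD xs b 0 with hm
  have hmval : m = xs[bn] := by
    rw [hm, ← hbnb, PySem.List.pyGetD_natCast, List.getD_eq_getElem _ _ hbnlen]
  have hdecomp : xs = xs.take bn ++ m :: xs.drop (bn + 1) := by
    conv_lhs => rw [← List.take_append_drop bn xs]
    rw [hmval, ← List.drop_eq_getElem_cons hbnlen]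
  have hpre : ∀ y ∈ xs.take bn, m < y := by
    intro y hy
    obtain ⟨i, hi, hiy⟩ := List.getElem_of_mem hy
    have hilen : i < xs.length := by simp at hi; omega
    have : PySem.List.pyGetD xs (i : Int) 0 = y := by
      rw [PySem.List.pyGetD_natCast, List.getD_eq_getElem _ _ hilen, ← hiy, List.getElem_take]
    rw [← this]
    exact hstrict (i : Int) (by omega) (by simp at hi; omega)
  obtain ⟨st₂, he, hmem₂, hlen₂⟩ :=
    run_prefix k m (xs.drop (bn + 1)) (xs.take bn) [] hpre (by simp) (by simp; omega)
  have hproc : go2 k (m :: xs.drop (bn + 1)) st₂ = go2 k (xs.drop (bn + 1)) [m] := by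
    simp only [go2]
    rw [pop2_all k (((xs.drop (bn + 1)).length : Int) + 1) m st₂ hmem₂
      (by simp only [List.length_drop]; omega)]
    rw [if_pos (by simp; omega)]
    rfl
  have hbis : go2 k (xs.drop (bn + 1)) [m] = m :: go2 (k - 1) (xs.drop (bn + 1)) [] := by
    apply bisim k m (xs.drop (bn + 1)) []
    intro a x bl hsplit hlen'
    have hxs2 : xs = (xs.take bn ++ m :: a) ++ x :: bl := by
      nth_rewrite 1 [hdecomp]
      rw [hsplit]
      simp
    have hlens : xs.length = bn + 1 + a.length + 1 + bl.length := by
      have hcong := congrArg List.length hxs2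
      simp only [List.length_append, List.length_cons, List.length_take] at hcong
      omega
    have hpl : ((bn + 1 + a.length : Nat) : Int) = ((xs.take bn ++ m :: a).length : Int) := by
      simp only [List.length_append, List.length_cons, List.length_take]
      omega
    have hx : PySem.List.pyGetD xs ((bn + 1 + a.length : Nat) : Int) 0 = x := by
      show (PySem.List.pyGet? xs ((bn + 1 + a.length : Nat) : Int)).getD 0 = x
      nth_rewrite 1 [hxs2]
      rw [hpl, PySem.List.pyGet?_append_length]
      rfl
    rw [← hx]
    apply hmin
    · positivity
    · push_cast
      omega
  calc go2 k xs [] = go2 k (xs.take bn ++ m :: xs.drop (bn + 1)) [] := by rw [← hdecomp]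
    _ = go2 k (m :: xs.drop (bn + 1)) st₂ := he
    _ = go2 k (xs.drop (bn + 1)) [m] := hproc
    _ = m :: go2 (k - 1) (xs.drop (bn + 1)) [] := hbis

theorem main_eq : ∀ (c : Nat) (xs : List Int) (k : Int), k.toNat = c → 0 < k → k ≤ (xs.length : Int) →
    go2 k xs [] = greedyRec xs k := by
  intro c
  induction c with
  | zero => intro xs k hc h0 _; omega
  | succ f ih =>
    intro xs k hc h0 hk
    rw [step_lemma xs k h0 hk]
    conv_rhs => rw [greedyRec]
    simp only [dif_pos h0]
    have hb0 : 0 ≤ pvScanB xs ((xs.length : Int) - (k - 1)) 1 0 :=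
      scan_nonneg _ _ 1 0 (by omega) le_rfl
    have htn : (pvScanB xs ((xs.length : Int) - (k - 1)) 1 0 + 1).toNat =
        (pvScanB xs ((xs.length : Int) - (k - 1)) 1 0).toNat + 1 := by omega
    rw [htn]
    congr 1
    by_cases h1 : 0 < k - 1
    · apply ih _ _ (by omega) h1
      obtain ⟨_, hbw, _, _⟩ :=
        scan_spec xs ((xs.length : Int) - (k - 1)) 1 0 le_rfl (by omega) (by omega)
          (by intro t ht1 ht2; omega)
          (by intro t ht1 ht2; have ht : t = 0 := by omega
              rw [ht])
      simp only [List.length_drop]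
      omega
    · rw [go2_nonpos (k - 1) (by omega), greedyRec, dif_neg h1]

-- ===== VERDICT (by name: the statement is the Claim_ definition above) =====
theorem solution_1130_3_spec : Claim_equal_solution_1130_3 := by
  intro nums k _
  unfold Spec_solution_1130_3
  have hA : solution_1130_3 nums k = go2 k nums [] := by
    unfold solution_1130_3
    have := loopA_eq nums k nums.length 0 [] (by omega)
    simpa using this
  rw [hA, alt_eq]
  by_cases hk : k ≥ (nums.length : Int)
  · rw [if_pos hk]
    rw [go2_full k nums [] (by simpa using hk)]
    simp
  · rw [if_neg hk]
    by_cases h0k : 0 < k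
    · exact main_eq k.toNat nums k rfl h0k (by omega)
    · rw [go2_nonpos k (by omega) nums]
      rw [greedyRec, dif_neg h0k]
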